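-- pv_equiv track=rewrite | github.com/Countdown369/kimberling-shuffle | kimberling.py | genNextLIRI
-- ===== SOURCE A (Python) =====
-- import math
--
-- def genNextLIRI(inrow, stage):
--     nextrow = []
--     cap = 2 * (stage - 1)
--
--     if stage == 1:
--         cap = 0
--
--     for x in range(cap):
--         if x % 2 == 0:
--             nextrow.append(inrow[(stage-1) - math.ceil((x+1)/2)])
--         else:
--             nextrow.append(inrow[(stage-1) + math.ceil((x+1)/2)])
--     for y in inrow[(stage+math.ceil(cap/2)):]:
--         nextrow.append(y)
--     return(nextrow)
-- ===== SOURCE B (Python) =====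
-- def genNextLIRI(inrow, stage):
--     if stage <= 1:
--         return inrow[2 * stage - 1:]
--     center = stage - 1
--     left = inrow[:center][::-1]
--     right = inrow[center + 1:2 * center + 1]
--     return [v for pair in zip(left, right) for v in pair] + inrow[2 * stage - 1:]
-- ===== Notes on version B (the rewrite author's own statement) =====
-- stated objective: alternative
-- what changed: Instead of an indexed loop with a parity test and a math.ceil call per element, B takes the reversed prefix before the center and the slice after it, interleaves them with zip, and concatenates the tail slice inrow[2*stage-1:] (the algebraic simplification of stage+ceil(cap/2)); no per-element indexing at all.
import Mathlib
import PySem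

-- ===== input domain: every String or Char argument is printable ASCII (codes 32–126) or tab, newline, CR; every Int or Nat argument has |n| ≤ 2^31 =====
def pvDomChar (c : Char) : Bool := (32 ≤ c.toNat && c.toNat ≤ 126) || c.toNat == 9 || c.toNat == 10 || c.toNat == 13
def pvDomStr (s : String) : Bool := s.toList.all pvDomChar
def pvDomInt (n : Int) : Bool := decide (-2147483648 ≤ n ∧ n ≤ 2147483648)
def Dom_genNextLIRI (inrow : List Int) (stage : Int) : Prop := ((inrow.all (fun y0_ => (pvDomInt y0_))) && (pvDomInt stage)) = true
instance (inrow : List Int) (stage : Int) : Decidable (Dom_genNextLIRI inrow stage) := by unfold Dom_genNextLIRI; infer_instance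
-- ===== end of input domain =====

-- B replaces A's indexed loop (parity test + math.ceil arithmetic) by slice/reverse/zip:
-- interleave the reversed prefix before the center with the slice after it, then append the
-- tail slice inrow[2*stage-1:] (objective: alternative formulation, same cost).

-- ===== PORT A =====
-- math.ceil(n/2) for an int n (exact: ceiling division)
def pvCeilHalf (n : Int) : Int := -(PySem.Int.floordiv (-n) 2)

def genNextLIRI (inrow : List Int) (stage : Int) : List Int :=
  let cap : Int := if stage = 1 then 0 else 2 * (stage - 1)
  let nextrow : List Int :=
    (PySem.List.pyRange 0 cap 1).foldl (fun acc x =>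
      if PySem.Int.mod x 2 = 0 then
        acc ++ [PySem.List.pyGetD inrow ((stage - 1) - pvCeilHalf (x + 1)) 0]
      else
        acc ++ [PySem.List.pyGetD inrow ((stage - 1) + pvCeilHalf (x + 1)) 0]) []
  nextrow ++ PySem.List.slice inrow (some (stage + pvCeilHalf cap)) none

-- ===== PORT B =====
-- inrow[:center][::-1] is ported as (slice …).reverse (PySem.List.slice?_none_none_neg_one:
-- xs[::-1] is exactly List.reverse); zip is List.zip, the pair comprehension is flatMap.
def genNextLIRI_alt (inrow : List Int) (stage : Int) : List Int :=
  if stage ≤ 1 then PySem.List.slice inrow (some (2 * stage - 1)) none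
  else
    let center : Int := stage - 1
    let left : List Int := (PySem.List.slice inrow none (some center)).reverse
    let right : List Int := PySem.List.slice inrow (some (center + 1)) (some (2 * center + 1))
    ((left.zip right).flatMap (fun p => [p.1, p.2])) ++
      PySem.List.slice inrow (some (2 * stage - 1)) none

-- ===== PRECONDITION & SPEC =====
-- Exactly the inputs where the Python A returns: for stage ≥ 2 the loop reads inrow[2*stage-2],
-- so rows shorter than 2*stage-1 make A raise IndexError; for stage ≤ 1 the loop is empty.
def Pre_genNextLIRI (inrow : List Int) (stage : Int) : Prop :=
  stage ≤ 1 ∨ 2 * stage - 1 ≤ (inrow.length : Int)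
instance (inrow : List Int) (stage : Int) : Decidable (Pre_genNextLIRI inrow stage) := by
  unfold Pre_genNextLIRI; infer_instance

def pvWitness_genNextLIRI : List Int × Int := ([10, 11, 12, 13, 14], 3)

def Spec_genNextLIRI (inrow : List Int) (stage : Int) (out : List Int) : Prop := out = genNextLIRI_alt inrow stage
instance (inrow : List Int) (stage : Int) (out : List Int) : Decidable (Spec_genNextLIRI inrow stage out) := by unfold Spec_genNextLIRI; infer_instance

-- ===== CLAIM (what is proved, stated in full; the proofs are below) =====
def Claim_equal_genNextLIRI : Prop := ∀ (inrow : List Int) (stage : Int), Dom_genNextLIRI inrow stage → Pre_genNextLIRI inrow stage → Spec_genNextLIRI inrow stage (genNextLIRI inrow stage)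

-- ===== LEMMAS AND PROOFS =====

theorem pvCeilHalf_eq (n : Int) : pvCeilHalf n = -((-n) / 2) := by
  unfold pvCeilHalf
  rw [PySem.Int.floordiv_eq_ediv_of_pos (by norm_num)]

-- A's interleaving loop over range(2*n) read as flatMap over k = 1..n of the index pair.
theorem pvLoopA_flatMap (inrow : List Int) (c : Int) (n : Nat) :
    (PySem.List.pyRange 0 (2 * (n : Int)) 1).foldl (fun acc x =>
      if PySem.Int.mod x 2 = 0 then
        acc ++ [PySem.List.pyGetD inrow (c - pvCeilHalf (x + 1)) 0]
      else
        acc ++ [PySem.List.pyGetD inrow (c + pvCeilHalf (x + 1)) 0]) []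
    = (List.range n).flatMap (fun (i : Nat) =>
        [PySem.List.pyGetD inrow (c - ((i : Int) + 1)) 0,
         PySem.List.pyGetD inrow (c + ((i : Int) + 1)) 0]) := by
  induction n with
  | zero => rw [PySem.List.pyRange_one_eq_nil (by norm_num)]; rfl
  | succ m ih =>
    have h1 : (2 : Int) * ((m : Nat) + 1 : Nat) = (2 * (m : Int) + 1) + 1 := by push_cast; ring
    rw [h1, PySem.List.pyRange_one_succ_right (by positivity),
        PySem.List.pyRange_one_succ_right (by positivity),
        List.foldl_append, List.foldl_append, ih, List.range_succ, List.flatMap_append]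
    simp only [List.foldl_cons, List.foldl_nil]
    have hme : PySem.Int.mod (2 * (m : Int)) 2 = 0 := by
      rw [PySem.Int.mod_eq_emod_of_pos (by norm_num)]; omega
    have hmo : PySem.Int.mod (2 * (m : Int) + 1) 2 = 1 := by
      rw [PySem.Int.mod_eq_emod_of_pos (by norm_num)]; omega
    have hc1 : pvCeilHalf (2 * (m : Int) + 1) = (m : Int) + 1 := by
      rw [pvCeilHalf_eq]; omega
    have hc2 : pvCeilHalf (2 * (m : Int) + 1 + 1) = (m : Int) + 1 := by
      rw [pvCeilHalf_eq]; omega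
    rw [hme, hmo, hc1, hc2]
    simp

-- interleaving a zip of equal-length lists, index form
theorem pvZip_flatMap (l r : List Int) (h : l.length = r.length) :
    (l.zip r).flatMap (fun p => [p.1, p.2])
    = (List.range l.length).flatMap (fun i => [l.getD i 0, r.getD i 0]) := by
  induction l generalizing r with
  | nil => simp
  | cons a l ih =>
    cases r with
    | nil => simp at h
    | cons b r =>
      simp only [List.length_cons] at h
      simp only [List.zip_cons_cons, List.flatMap_cons, List.length_cons,
        List.range_succ_eq_map, List.flatMap_cons, List.flatMap_map]
      rw [ih r (by omega)]
      simp

-- The ports agree on every input satisfying Pre_.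
theorem pvPorts_eq (inrow : List Int) (stage : Int) (hpre : Pre_genNextLIRI inrow stage) :
    genNextLIRI inrow stage = genNextLIRI_alt inrow stage := by
  unfold genNextLIRI genNextLIRI_alt
  dsimp only
  by_cases h2 : stage ≤ 1
  · -- stage ≤ 1: A's loop is empty, and A's tail start stage + ceil(cap/2) equals 2*stage-1
    simp only [h2, if_true]
    by_cases hs1 : stage = 1
    · subst hs1
      rw [if_pos rfl, PySem.List.pyRange_one_eq_nil (by norm_num)]
      simp [pvCeilHalf_eq]
    · rw [if_neg hs1, PySem.List.pyRange_one_eq_nil (by omega)]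
      have htail : stage + pvCeilHalf (2 * (stage - 1)) = 2 * stage - 1 := by
        rw [pvCeilHalf_eq]; omega
      rw [htail]; simp
  · -- stage ≥ 2 and 2*stage-1 ≤ len
    have hlen : 2 * stage - 1 ≤ (inrow.length : Int) := by
      rcases hpre with h | h <;> omega
    rw [if_neg h2, if_neg (by omega : ¬ stage = 1)]
    obtain ⟨n, hn⟩ : ∃ n : Nat, stage - 1 = (n : Int) := ⟨(stage - 1).toNat, by omega⟩
    have hnlen : 2 * n + 1 ≤ inrow.length := by omega
    have htail : stage + pvCeilHalf (2 * (stage - 1)) = 2 * stage - 1 := by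
      rw [pvCeilHalf_eq]; omega
    have hcap : 2 * (stage - 1) = 2 * (n : Int) := by omega
    rw [htail, hcap, hn, pvLoopA_flatMap]
    -- identify B's slices
    have hleft : (PySem.List.slice inrow none (some ((n : Int)))).reverse
        = (inrow.take n).reverse := by rw [PySem.List.slice_to_natCast]
    have hright : PySem.List.slice inrow (some ((n : Int) + 1)) (some (2 * (n : Int) + 1))
        = (inrow.drop (n + 1)).take n := by
      have : (2 * (n : Int) + 1) = ((n : Int) + 1) + (n : Int) := by ring
      rw [this]
      exact_mod_cast PySem.List.slice_natCast_add inrow (n + 1) n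
    rw [hleft, hright]
    have hll : (inrow.take n).reverse.length = n := by
      simp [List.length_take]; omega
    have hrl : ((inrow.drop (n + 1)).take n).length = n := by
      simp [List.length_take, List.length_drop]; omega
    rw [pvZip_flatMap _ _ (by rw [hll, hrl]), hll]
    congr 1
    apply List.flatMap_congr  -- pointwise on i < n
    intro i hi
    rw [List.mem_range] at hi
    have h1 : PySem.List.pyGetD inrow ((n : Int) - ((i : Int) + 1)) 0 = inrow[n - 1 - i]'(by omega) := by
      have : ((n : Int) - ((i : Int) + 1)) = ((n - 1 - i : Nat) : Int) := by omega
      rw [this, PySem.List.pyGetD_natCast, List.getD_eq_getElem _ _ (by omega)]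
    have h2' : PySem.List.pyGetD inrow ((n : Int) + ((i : Int) + 1)) 0 = inrow[n + 1 + i]'(by omega) := by
      have : ((n : Int) + ((i : Int) + 1)) = ((n + 1 + i : Nat) : Int) := by push_cast; ring
      rw [this, PySem.List.pyGetD_natCast, List.getD_eq_getElem _ _ (by omega)]
    have h3 : (inrow.take n).reverse.getD i 0 = inrow[n - 1 - i]'(by omega) := by
      rw [List.getD_eq_getElem _ _ (by rw [hll]; omega), List.getElem_reverse,
        List.getElem_take]
      congr 1
      rw [List.length_take]; omega
    have h4 : ((inrow.drop (n + 1)).take n).getD i 0 = inrow[n + 1 + i]'(by omega) := by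
      rw [List.getD_eq_getElem _ _ (by rw [hrl]; omega), List.getElem_take, List.getElem_drop]
    rw [h1, h2', h3, h4]

-- ===== VERDICT (by name: the statement is the Claim_ definition above) =====
theorem genNextLIRI_spec : Claim_equal_genNextLIRI := by
  intro inrow stage _ hpre
  unfold Spec_genNextLIRI
  exact pvPorts_eq inrow stage hpre
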